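-- pv_equiv track=rewrite | github.com/Usagi5677/kanjireader | check_self_radicals.py | categorize_by_radical_count
-- ===== SOURCE A (Python) =====
-- from typing import Dict, List, Tuple
--
-- def categorize_by_radical_count(self_radicals: List[Tuple[str, List[str]]]) -> Dict[int, List[Tuple[str, List[str]]]]:
--     """Categorize kanji by the number of radicals they have"""
--     categories = {}
--
--     for kanji, radicals in self_radicals:
--         count = len(radicals)
--         if count not in categories:
--             categories[count] = []
--         categories[count].append((kanji, radicals))
--
--     return categories
-- ===== SOURCE B (Python) =====
-- def categorize_by_radical_count(self_radicals):
--     """Categorize kanji by the number of radicals they have"""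
--     counts = []
--     for _, radicals in self_radicals:
--         c = len(radicals)
--         if c not in counts:
--             counts.append(c)
--     return {c: [(kanji, radicals) for kanji, radicals in self_radicals
--                 if len(radicals) == c]
--             for c in counts}
-- ===== Notes on version B (the rewrite author's own statement) =====
-- stated objective: alternative
-- what changed: B first collects the distinct radical counts in order of first appearance, then builds the dict in one comprehension by filtering the input per count, instead of A's single pass that mutates per-key bucket lists in a dict.
import Mathlib
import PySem

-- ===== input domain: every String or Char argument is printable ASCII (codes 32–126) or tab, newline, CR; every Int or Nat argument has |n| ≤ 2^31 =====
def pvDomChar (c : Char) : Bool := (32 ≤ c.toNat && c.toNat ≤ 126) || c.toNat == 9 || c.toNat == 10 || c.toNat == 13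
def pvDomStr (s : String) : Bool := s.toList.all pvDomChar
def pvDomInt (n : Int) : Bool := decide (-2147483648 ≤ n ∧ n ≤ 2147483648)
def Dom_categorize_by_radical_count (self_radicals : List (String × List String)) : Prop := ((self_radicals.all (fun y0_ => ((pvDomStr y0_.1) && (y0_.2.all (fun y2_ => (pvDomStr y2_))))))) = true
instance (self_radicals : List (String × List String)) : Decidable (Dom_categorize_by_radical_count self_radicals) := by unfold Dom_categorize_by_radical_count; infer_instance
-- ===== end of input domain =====

-- B builds the dict by first deduplicating the radical counts, then filtering the
-- input once per distinct count; A's single pass mutates per-key bucket lists in a dict.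

-- ===== PORT A =====
def categorize_by_radical_count (self_radicals : List (String × List String)) : List (Int × List (String × List String)) :=
  (self_radicals.foldl
    (fun categories kr =>
      let count : Int := (kr.2.length : Int)
      let categories :=
        if categories.contains count = false then categories.insert count [] else categories
      -- categories[count].append((kanji, radicals))
      categories.modify count [] (fun l => l ++ [kr]))
    PySem.Dict.empty).items

-- ===== PORT B =====
def categorize_by_radical_count_alt (self_radicals : List (String × List String)) : List (Int × List (String × List String)) :=
  let counts : List Int :=
    self_radicals.foldl (fun counts kr => PySem.Set.add counts (kr.2.length : Int)) []
  counts.map (fun c => (c, self_radicals.filter (fun kr => (kr.2.length : Int) == c)))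

-- ===== PRECONDITION & SPEC =====
def Spec_categorize_by_radical_count (self_radicals : List (String × List String)) (out : List (Int × List (String × List String))) : Prop := out = categorize_by_radical_count_alt self_radicals
instance (self_radicals : List (String × List String)) (out : List (Int × List (String × List String))) : Decidable (Spec_categorize_by_radical_count self_radicals out) := by unfold Spec_categorize_by_radical_count; infer_instance

-- ===== CLAIM (what is proved, stated in full; the proofs are below) =====
def Claim_equal_categorize_by_radical_count : Prop := ∀ (self_radicals : List (String × List String)), Dom_categorize_by_radical_count self_radicals → Spec_categorize_by_radical_count self_radicals (categorize_by_radical_count self_radicals)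

-- ===== LEMMAS AND PROOFS =====

-- A's loop body (setdefault-to-[] then append) is exactly Dict.modify with default [].
lemma stepA_eq_modify (d : PySem.Dict Int (List (String × List String))) (k : Int)
    (x : String × List String) :
    ((if d.contains k = false then d.insert k [] else d).modify k [] (fun l => l ++ [x]))
      = d.modify k [] (fun l => l ++ [x]) := by
  by_cases h : d.contains k = true
  · simp [h]
  · simp only [Bool.not_eq_true] at h
    rw [if_pos h]
    simp only [PySem.Dict.modify, PySem.Dict.getD_insert_self, PySem.Dict.insert_insert_self,
      PySem.Dict.getD_of_not_contains (h := h)]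

lemma foldA_gen (self_radicals : List (String × List String)) :
    ∀ d : PySem.Dict Int (List (String × List String)),
    self_radicals.foldl
      (fun categories kr =>
        let count : Int := (kr.2.length : Int)
        let categories :=
          if categories.contains count = false then categories.insert count [] else categories
        categories.modify count [] (fun l => l ++ [kr])) d
    = self_radicals.foldl
        (fun d kr => d.modify (kr.2.length : Int) [] (fun l => l ++ [kr])) d := by
  induction self_radicals with
  | nil => intro d; rfl
  | cons x xs ih =>
      intro d
      simp only [List.foldl_cons]
      rw [stepA_eq_modify]
      exact ih _

lemma foldA_eq_modify_fold (self_radicals : List (String × List String)) :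
    self_radicals.foldl
      (fun categories kr =>
        let count : Int := (kr.2.length : Int)
        let categories :=
          if categories.contains count = false then categories.insert count [] else categories
        categories.modify count [] (fun l => l ++ [kr]))
      PySem.Dict.empty
    = (self_radicals.map (fun kr => ((kr.2.length : Int), kr))).foldl
        (fun d p => d.modify p.1 [] (fun l => l ++ [p.2])) PySem.Dict.empty := by
  rw [List.foldl_map]
  exact foldA_gen self_radicals PySem.Dict.empty

-- ===== VERDICT (by name: the statement is the Claim_ definition above) =====
theorem categorize_by_radical_count_spec : Claim_equal_categorize_by_radical_count := by
  intro srs _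
  unfold Spec_categorize_by_radical_count categorize_by_radical_count categorize_by_radical_count_alt
  rw [foldA_eq_modify_fold]
  have hB : srs.foldl (fun counts kr => PySem.Set.add counts ((kr.2.length : Int))) []
      = PySem.Set.ofList (srs.map (fun kr => ((kr.2.length : Int)))) := by
    rw [← PySem.Set.update_map_eq_foldl_add, PySem.Set.update_nil_left]
  rw [hB]
  have hnd : ((srs.map (fun kr => ((kr.2.length : Int), kr))).foldl
      (fun d p => d.modify p.1 [] (fun l => l ++ [p.2])) PySem.Dict.empty).keys.Nodup := by
    apply PySem.Dict.nodup_keys_foldl_modify_key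
    exact PySem.Dict.nodup_keys_empty
  rw [PySem.Dict.items_eq_map_keys _ hnd []]
  rw [PySem.Dict.keys_foldl_modify_key]
  simp only [PySem.Dict.keys_empty, PySem.Set.update_nil_left, List.map_map]
  apply List.map_congr_left
  intro c hc
  rw [PySem.Dict.getD_foldl_modify_append]
  simp [List.filter_map, List.map_map, Function.comp_def]
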